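-- pv_equiv track=rewrite | github.com/pypi-data/pypi-mirror-401 | packages/basicthainlp/basicthainlp-0.5.6-py3-none-any.whl/basicthainlp/spelling/Spelling.py | contectFreeGram
-- ===== SOURCE A (Python) =====
-- def contectFreeGram(word):
--     biGram = []
--     triGram = []
--     if len(word) > 0:
--         word = '<'+str(word)+'>'
--         biGram.append(word[0]+word[1])
--         for i in range(1,len(word) - 2):
--             biGram.append(word[i]+word[i+1])
--             triGram.append(word[i-1]+word[i]+word[i+1])
--         biGram.append(word[-2]+word[-1])
--         triGram.append(word[-3]+word[-2]+word[-1])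
--     return biGram,triGram
-- ===== SOURCE B (Python) =====
-- def contectFreeGram(word):
--     if len(word) == 0:
--         return [], []
--     padded = '<' + str(word) + '>'
--     biGram = [padded[i:i+2] for i in range(len(padded) - 1)]
--     triGram = [padded[i:i+3] for i in range(len(padded) - 2)]
--     return biGram, triGram
-- ===== Notes on version B (the rewrite author's own statement) =====
-- stated objective: simpler
-- what changed: Replaces the interleaved index loop with hand-appended first/last n-grams by two uniform slicing comprehensions over the padded word.
import Mathlib
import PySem

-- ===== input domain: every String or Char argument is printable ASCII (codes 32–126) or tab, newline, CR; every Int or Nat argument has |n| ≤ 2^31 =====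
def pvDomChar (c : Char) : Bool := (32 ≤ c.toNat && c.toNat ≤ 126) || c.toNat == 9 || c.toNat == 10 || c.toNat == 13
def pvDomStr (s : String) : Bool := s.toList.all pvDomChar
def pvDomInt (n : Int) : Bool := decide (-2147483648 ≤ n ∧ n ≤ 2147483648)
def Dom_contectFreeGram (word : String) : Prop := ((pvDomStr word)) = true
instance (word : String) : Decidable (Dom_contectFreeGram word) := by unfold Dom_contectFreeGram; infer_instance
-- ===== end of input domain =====

-- B builds the bigram and trigram lists by two uniform slicing comprehensions over the
-- padded word instead of A's interleaved index loop with hand-appended first/last n-grams.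

-- ===== PORT A =====
def contectFreeGram (word : String) : List String × List String :=
  let biGram : List String := []
  let triGram : List String := []
  if PySem.Str.len word > 0 then
    let w : List Char := ['<'] ++ word.toList ++ ['>']
    let biGram := biGram ++ [String.mk [PySem.List.pyGetD w 0 ' ', PySem.List.pyGetD w 1 ' ']]
    let r := (PySem.List.pyRange 1 (PySem.List.len w - 2) 1).foldl
      (fun (st : List String × List String) i =>
        (st.1 ++ [String.mk [PySem.List.pyGetD w i ' ', PySem.List.pyGetD w (i + 1) ' ']],
         st.2 ++ [String.mk [PySem.List.pyGetD w (i - 1) ' ', PySem.List.pyGetD w i ' ',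
                             PySem.List.pyGetD w (i + 1) ' ']]))
      (biGram, triGram)
    (r.1 ++ [String.mk [PySem.List.pyGetD w (-2) ' ', PySem.List.pyGetD w (-1) ' ']],
     r.2 ++ [String.mk [PySem.List.pyGetD w (-3) ' ', PySem.List.pyGetD w (-2) ' ',
                        PySem.List.pyGetD w (-1) ' ']])
  else (biGram, triGram)

-- ===== PORT B =====
def contectFreeGram_alt (word : String) : List String × List String :=
  if PySem.Str.len word = 0 then ([], [])
  else
    let padded : List Char := ['<'] ++ word.toList ++ ['>']
    ((PySem.List.pyRange 0 (PySem.List.len padded - 1) 1).map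
        (fun i => String.mk (PySem.List.slice padded (some i) (some (i + 2)))),
     (PySem.List.pyRange 0 (PySem.List.len padded - 2) 1).map
        (fun i => String.mk (PySem.List.slice padded (some i) (some (i + 3)))))

-- ===== PRECONDITION & SPEC =====
def Spec_contectFreeGram (word : String) (out : List String × List String) : Prop := out = contectFreeGram_alt word
instance (word : String) (out : List String × List String) : Decidable (Spec_contectFreeGram word out) := by unfold Spec_contectFreeGram; infer_instance

-- ===== CLAIM (what is proved, stated in full; the proofs are below) =====
def Claim_equal_contectFreeGram : Prop := ∀ (word : String), Dom_contectFreeGram word → Spec_contectFreeGram word (contectFreeGram word)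

-- ===== LEMMAS AND PROOFS =====

-- slicing two / three consecutive elements is just the two / three elements
lemma take_drop_two {α : Type} (xs : List α) (j : Nat) (h : j + 2 ≤ xs.length) :
    (xs.drop j).take 2 = [xs[j], xs[j+1]] := by
  rw [List.drop_eq_getElem_cons (by omega), List.take_succ_cons,
      List.drop_eq_getElem_cons (by omega), List.take_succ_cons, List.take_zero]
  rfl

lemma take_drop_three {α : Type} (xs : List α) (j : Nat) (h : j + 3 ≤ xs.length) :
    (xs.drop j).take 3 = [xs[j], xs[j+1], xs[j+2]] := by
  rw [List.drop_eq_getElem_cons (by omega), List.take_succ_cons,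
      List.drop_eq_getElem_cons (by omega), List.take_succ_cons,
      List.drop_eq_getElem_cons (by omega), List.take_succ_cons, List.take_zero]
  rfl

lemma slice_two (xs : List Char) (j : Nat) (h : j + 2 ≤ xs.length) :
    PySem.List.slice xs (some (j : Int)) (some ((j : Int) + 2)) = [xs[j], xs[j+1]] := by
  have : ((j : Int) + 2) = ((j : Int) + ((2 : Nat) : Int)) := by push_cast; ring
  rw [this, PySem.List.slice_natCast_add, take_drop_two xs j h]

lemma slice_three (xs : List Char) (j : Nat) (h : j + 3 ≤ xs.length) :
    PySem.List.slice xs (some (j : Int)) (some ((j : Int) + 3)) = [xs[j], xs[j+1], xs[j+2]] := by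
  have : ((j : Int) + 3) = ((j : Int) + ((3 : Nat) : Int)) := by push_cast; ring
  rw [this, PySem.List.slice_natCast_add, take_drop_three xs j h]

theorem contectFreeGram_spec : Claim_equal_contectFreeGram := by
  intro word _
  unfold Spec_contectFreeGram contectFreeGram contectFreeGram_alt
  rcases hcs : word.toList with _ | ⟨c, t⟩
  · simp [PySem.Str.len_eq, hcs]
  · have hlen : word.toList.length = t.length + 1 := by rw [hcs]; simp
    rw [if_pos (show PySem.Str.len word > 0 by rw [PySem.Str.len_eq, hlen]; push_cast; omega),
        if_neg (show ¬ PySem.Str.len word = 0 by rw [PySem.Str.len_eq, hlen]; push_cast; omega)]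
    dsimp only
    set m := t.length with hm
    set w : List Char := ['<'] ++ (c :: t) ++ ['>'] with hw
    have hwlen : w.length = m + 3 := by simp [hw, hm]
    have hL : PySem.List.len w = (m : Int) + 3 := by
      rw [PySem.List.len_eq, hwlen]; push_cast; ring
    -- split the paired loop and turn appends into maps
    rw [PySem.List.foldl_prod_mk
        (f := fun acc (i : Int) => acc ++ [String.mk [PySem.List.pyGetD w i ' ', PySem.List.pyGetD w (i + 1) ' ']])
        (g := fun acc (i : Int) => acc ++ [String.mk [PySem.List.pyGetD w (i - 1) ' ', PySem.List.pyGetD w i ' ', PySem.List.pyGetD w (i + 1) ' ']])]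
    rw [PySem.List.foldl_append_singleton_eq_map, PySem.List.foldl_append_singleton_eq_map]
    -- turn the ranges into Nat ranges
    rw [hL]
    have h2 : ((m : Int) + 3 - 1) = ((m + 2 : Nat) : Int) := by push_cast; ring
    have h3 : ((m : Int) + 3 - 2) = ((m + 1 : Nat) : Int) := by push_cast; ring
    rw [h2, h3]
    rw [PySem.List.pyRange_one 1 ((m + 1 : Nat) : Int),
        PySem.List.pyRange_one 0 ((m + 2 : Nat) : Int),
        PySem.List.pyRange_one 0 ((m + 1 : Nat) : Int)]
    have e1 : (((m + 1 : Nat) : Int) - 1).toNat = m := by omega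
    have e2 : (((m + 2 : Nat) : Int) - 0).toNat = m + 2 := by omega
    have e3 : (((m + 1 : Nat) : Int) - 0).toNat = m + 1 := by omega
    rw [e1, e2, e3]
    -- elementwise values
    have hB : ∀ (j : Nat) (hj : j + 2 ≤ m + 3),
        String.mk (PySem.List.slice w (some (j : Int)) (some ((j : Int) + 2)))
          = String.mk [w[j]'(by omega), w[j+1]'(by omega)] := by
      intro j hj
      rw [slice_two w j (by omega)]; rfl
    have hT : ∀ (j : Nat) (hj : j + 3 ≤ m + 3),
        String.mk (PySem.List.slice w (some (j : Int)) (some ((j : Int) + 3)))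
          = String.mk [w[j]'(by omega), w[j+1]'(by omega), w[j+2]'(by omega)] := by
      intro j hj
      rw [slice_three w j (by omega)]; rfl
    -- pointwise bridges between A's index expressions and B's slices
    have hg2 : ∀ (j : Nat) (hj : j < m + 3), PySem.List.pyGetD w (j : Int) ' ' = w[j]'(by omega) := by
      intro j hj
      rw [PySem.List.pyGetD_natCast, List.getD_eq_getElem w ' ' (by omega)]
    have keyB : ∀ (a a' b : Int) (j : Nat), a = (j : Int) → a' = (j : Int) + 1 → b = (j : Int) →
        j + 2 ≤ m + 3 →
        String.mk [PySem.List.pyGetD w a ' ', PySem.List.pyGetD w a' ' ']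
          = String.mk (PySem.List.slice w (some b) (some (b + 2))) := by
      intro a a' b j ha ha' hb hj
      subst ha; subst hb
      have c1 : a' = ((j + 1 : Nat) : Int) := by push_cast; omega
      rw [c1, hB j hj, hg2 j (by omega), hg2 (j+1) (by omega)]
    have keyT : ∀ (a a' a'' b : Int) (j : Nat), a = (j : Int) → a' = (j : Int) + 1 →
        a'' = (j : Int) + 2 → b = (j : Int) → j + 3 ≤ m + 3 →
        String.mk [PySem.List.pyGetD w a ' ', PySem.List.pyGetD w a' ' ', PySem.List.pyGetD w a'' ' ']
          = String.mk (PySem.List.slice w (some b) (some (b + 3))) := by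
      intro a a' a'' b j ha ha' ha'' hb hj
      subst ha; subst hb
      have c1 : a' = ((j + 1 : Nat) : Int) := by push_cast; omega
      have c2 : a'' = ((j + 2 : Nat) : Int) := by push_cast; omega
      rw [c1, c2, hT j hj, hg2 j (by omega), hg2 (j+1) (by omega), hg2 (j+2) (by omega)]
    refine Prod.ext ?_ ?_
    · -- bigrams
      rw [show m + 2 = (m + 1) + 1 from rfl, List.range_succ, List.range_succ_eq_map]
      simp only [List.map_append, List.map_cons, List.map_map, List.map_nil, List.nil_append,
        List.cons_append]
      congr 1
      · -- first bigram
        exact keyB 0 1 (0 + ((0 : Nat) : Int)) 0 (by norm_num) (by norm_num) (by push_cast <;> omega)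
          (by omega)
      congr 1
      · -- middle bigrams
        apply List.map_congr_left
        intro k hk
        rw [List.mem_range] at hk
        simp only [Function.comp_apply]
        exact keyB (1 + (k : Int)) (1 + (k : Int) + 1) (0 + ((k.succ : Nat) : Int)) (k + 1)
          (by push_cast <;> omega) (by push_cast <;> omega) (by push_cast <;> omega) (by omega)
      · -- last bigram
        congr 1
        rw [PySem.List.pyGetD_neg_ofNat w 2 ' ' (by omega) (by omega),
            PySem.List.pyGetD_neg_ofNat w 1 ' ' (by omega) (by omega),
            zero_add, hB (m + 1) (by omega)]
        simp only [hwlen]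
        rfl
    · -- trigrams
      simp only [List.map_map, List.nil_append]
      rw [List.range_succ, List.map_append]
      congr 1
      · -- middle trigrams
        apply List.map_congr_left
        intro k hk
        rw [List.mem_range] at hk
        simp only [Function.comp_apply]
        exact keyT (1 + (k : Int) - 1) (1 + (k : Int)) (1 + (k : Int) + 1) (0 + (k : Int)) k
          (by push_cast <;> omega) (by push_cast <;> omega) (by push_cast <;> omega) (by push_cast <;> omega)
          (by omega)
      · -- last trigram
        simp only [List.map_cons, List.map_nil, Function.comp_apply]
        congr 1
        rw [PySem.List.pyGetD_neg_ofNat w 3 ' ' (by omega) (by omega),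
            PySem.List.pyGetD_neg_ofNat w 2 ' ' (by omega) (by omega),
            PySem.List.pyGetD_neg_ofNat w 1 ' ' (by omega) (by omega),
            zero_add, hT m (by omega)]
        simp only [hwlen]
        rfl
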